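-- pv_equiv track=rewrite | github.com/miliar/Code_Jam_Webscraper | solutions_python/Problem_177/3560.py | getresult
-- ===== SOURCE A (Python) =====
-- def getresult(num):
--     count = 10
--     array = [0]*10
--     counted = {}
--     nownum = 0
--     tmpnum = 0
--     while True:
--         nownum += num
--         if nownum in counted:
--             return "INSOMNIA"
--         counted[nownum] = 1
--         tmpnum = nownum
--         while tmpnum > 0:
--             rem = tmpnum % 10
--             if array[rem] == 0:
--                 count -= 1
--                 array[rem] += 1
--             if count == 0:
--                 return str(nownum)
--             tmpnum = int(tmpnum / 10)
-- ===== SOURCE B (Python) =====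
-- def getresult(num):
--     # Per-digit decomposition: for each digit d find the first multiple of num
--     # that contains d; the answer is the multiple at the largest of those indices.
--     if num == 0:
--         return "INSOMNIA"
--
--     def first_k(d):
--         k = 0
--         while True:
--             k += 1
--             t = k * num
--             while t > 0:
--                 if t % 10 == d:
--                     return k
--                 t //= 10
--
--     return str(num * max(first_k(d) for d in range(10)))
-- ===== Notes on version B (the rewrite author's own statement) =====
-- stated objective: alternative
-- what changed: B replaces A's single cumulative scan (dict cycle-detection, 10-slot count array, decrementing counter, mid-loop early return) by a per-digit decomposition: for each digit d it independently searches for the first multiple of num containing d, then returns the multiple at the maximum of those ten indices.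
import Mathlib
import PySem

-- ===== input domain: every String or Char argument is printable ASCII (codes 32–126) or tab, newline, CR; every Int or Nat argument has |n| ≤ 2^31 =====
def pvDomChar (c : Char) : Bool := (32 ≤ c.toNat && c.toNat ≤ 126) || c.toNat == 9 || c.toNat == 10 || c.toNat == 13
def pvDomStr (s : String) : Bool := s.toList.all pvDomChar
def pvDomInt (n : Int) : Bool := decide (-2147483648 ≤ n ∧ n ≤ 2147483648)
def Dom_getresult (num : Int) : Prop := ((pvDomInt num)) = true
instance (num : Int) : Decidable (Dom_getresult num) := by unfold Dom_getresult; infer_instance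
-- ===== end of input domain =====

-- B replaces A's single cumulative scan (cycle-detection dict, 10-slot array, decrementing
-- counter, mid-digit-loop early return) by a per-digit decomposition: for each digit d it
-- searches independently for the first multiple of num containing d, and returns the multiple
-- at the maximum of those ten indices (objective: alternative algorithm, not claimed faster).
-- Both versions' unbounded while-loops are ported with fuel (totality bookkeeping only;
-- 100000 candidate multiples far exceed what any admitted input needs).

-- ===== PORT A =====
-- Inner `while tmpnum > 0` loop of A, returning (early return value?, count, array).
-- `int(tmpnum / 10)` is float division in Python; for the positive tmpnum < 2^53 that
-- this port can reach it equals floor division, ported as PySem.Int.floordiv (exact there).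
-- Fuel is structural-recursion bookkeeping only: tmpnum strictly decreases, so
-- tmpnum.toNat iterations suffice and getresult passes that.
def digitLoopA (fuel : Nat) (count : Int) (array : List Int) (nownum tmpnum : Int) :
    Option String × Int × List Int :=
  match fuel with
  | 0 => (none, count, array)
  | fuel + 1 =>
    if 0 < tmpnum then
      let rem := PySem.Int.mod tmpnum 10
      let hit := PySem.List.pyGetD array rem 0    -- array[rem], rem ∈ [0,10), |array| = 10
      let count' := if hit = 0 then count - 1 else count
      let array' := if hit = 0 then PySem.List.pySetD array rem (hit + 1) else array
      if count' = 0 then (some (PySem.Int.toStr nownum), count', array')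
      else digitLoopA fuel count' array' nownum (PySem.Int.floordiv tmpnum 10)
    else (none, count, array)

-- Outer `while True` loop of A (fuel = totality guard for the unbounded while).
def loopA (fuel : Nat) (num count : Int) (array : List Int) (counted : PySem.Dict Int Int)
    (nownum : Int) : String :=
  match fuel with
  | 0 => "INSOMNIA"
  | fuel + 1 =>
    let nownum' := nownum + num
    if counted.contains nownum' then "INSOMNIA"
    else
      let counted' := counted.insert nownum' 1
      match digitLoopA (nownum'.toNat + 1) count array nownum' nownum' with
      | (some s, _, _) => s
      | (none, count', array') => loopA fuel num count' array' counted' nownum'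

def getresult (num : Int) : String :=
  loopA 100000 num 10 (List.replicate 10 0) PySem.Dict.empty 0

-- ===== PORT B =====
-- Inner `while t > 0` loop of B's first_k: does digit d occur in t? (early return on hit;
-- fuel is totality bookkeeping, t strictly decreases so t.toNat + 1 suffices).
def digitSearch (fuel : Nat) (d t : Int) : Bool :=
  match fuel with
  | 0 => false
  | fuel + 1 =>
    if 0 < t then
      if PySem.Int.mod t 10 = d then true
      else digitSearch fuel d (PySem.Int.floordiv t 10)
    else false

-- Outer `while True` loop of B's first_k (fuel = totality guard; none = fuel exhausted).
def firstK (fuel : Nat) (num d k : Int) : Option Int :=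
  match fuel with
  | 0 => none
  | fuel + 1 =>
    let k' := k + 1
    if digitSearch ((k' * num).toNat + 1) d (k' * num) then some k'
    else firstK fuel num d k'

-- the fold behind `max(first_k(d) for d in range(10))`: none once a search exhausts fuel
def foldStep (num : Int) : Option Int → Int → Option Int := fun acc d =>
  match acc, firstK 100000 num d 0 with
  | some m, some k => some (max m k)
  | _, _ => none

-- str(num * max(first_k(d) for d in range(10)))
def getresult_alt (num : Int) : String :=
  if num = 0 then "INSOMNIA"
  else
    match (PySem.List.pyRange 0 10 1).foldl (foldStep num) (some 0) with
    | some K => PySem.Int.toStr (num * K)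
    | none => "INSOMNIA"

-- ===== PRECONDITION & SPEC =====
-- For num < 0 the Python A never terminates (negative multiples contribute no digits
-- and never repeat), so no value is returned there; Pre_ excludes exactly those inputs.
def Pre_getresult (num : Int) : Prop := 0 ≤ num
instance (num : Int) : Decidable (Pre_getresult num) := by unfold Pre_getresult; infer_instance
def pvWitness_getresult : Int := (7)

def Spec_getresult (num : Int) (out : String) : Prop := out = getresult_alt num
instance (num : Int) (out : String) : Decidable (Spec_getresult num out) := by
  unfold Spec_getresult; infer_instance

-- ===== CLAIM (what is proved, stated in full; the proofs are below) =====
def Claim_equal_getresult : Prop :=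
  ∀ (num : Int), Dom_getresult num → Pre_getresult num → Spec_getresult num (getresult num)

-- ===== LEMMAS AND PROOFS =====

-- Canonical digit-membership predicate: d occurs among the base-10 residues of t.
def hasDig (t d : Int) : Bool :=
  if _h : 0 < t then
    (PySem.Int.mod t 10 = d) || hasDig (PySem.Int.floordiv t 10) d
  else false
termination_by t.toNat
decreasing_by
  have h10 : PySem.Int.floordiv t 10 = t / 10 := PySem.Int.floordiv_eq_ediv_of_pos (by norm_num)
  omega

theorem digitSearch_eq_hasDig (fuel : Nat) (d : Int) :
    ∀ t : Int, t.toNat < fuel → digitSearch fuel d t = hasDig t d := by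
  induction fuel with
  | zero => intro t ht; omega
  | succ fuel ih =>
    intro t ht
    rw [hasDig]
    by_cases hp : 0 < t
    · have h10 : PySem.Int.floordiv t 10 = t / 10 :=
        PySem.Int.floordiv_eq_ediv_of_pos (by norm_num)
      have hfl : (PySem.Int.floordiv t 10).toNat < fuel := by omega
      simp only [digitSearch, hp, if_true]
      rw [ih _ hfl]
      by_cases hm : PySem.Int.mod t 10 = d <;> simp
    · simp [digitSearch, hp]

theorem hasDig_nonpos {t d : Int} (h : ¬ 0 < t) : hasDig t d = false := by
  rw [hasDig]; simp [h]

theorem hasDig_bounds_fuel (fuel : Nat) (d : Int) :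
    ∀ t : Int, digitSearch fuel d t = true → 0 ≤ d ∧ d < 10 := by
  induction fuel with
  | zero => intro t h; simp [digitSearch] at h
  | succ fuel ih =>
    intro t h
    by_cases hp : 0 < t
    · by_cases hm : PySem.Int.mod t 10 = d
      · subst hm
        exact ⟨PySem.Int.mod_nonneg t (by norm_num), PySem.Int.mod_lt t (by norm_num)⟩
      · simp only [digitSearch, hp, if_true, hm, if_false] at h
        exact ih _ h
    · simp [digitSearch, hp] at h

theorem hasDig_bounds {t d : Int} (h : hasDig t d = true) : 0 ≤ d ∧ d < 10 := by
  rw [← digitSearch_eq_hasDig (t.toNat + 1) d t (by omega)] at h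
  exact hasDig_bounds_fuel _ _ _ h

-- Proof-side reference for the digits collected from the multiples scanned so far.
def collectDigits (fuel : Nat) (seen : PySem.Set Int) (t : Int) : PySem.Set Int :=
  match fuel with
  | 0 => seen
  | fuel + 1 =>
    if 0 < t then
      collectDigits fuel (PySem.Set.add seen (PySem.Int.mod t 10)) (PySem.Int.floordiv t 10)
    else seen

-- Proof-side reference loop: the cumulative scan A performs, phrased over a digit set.
def loopR (fuel : Nat) (num : Int) (seen : PySem.Set Int) (n : Int) : String :=
  match fuel with
  | 0 => "INSOMNIA"
  | fuel + 1 =>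
    let n' := n + num
    let seen' := collectDigits (n'.toNat + 1) seen n'
    if PySem.Set.len seen' = 10 then PySem.Int.toStr n' else loopR fuel num seen' n'

-- The relation between A's (count, array) and the reference digit set.
def DigitInv (count : Int) (array : List Int) (seen : List Int) : Prop :=
  array.length = 10 ∧ seen.Nodup ∧ (∀ x ∈ seen, 0 ≤ x ∧ x < 10) ∧
  count = 10 - (seen.length : Int) ∧
  (∀ i : Int, 0 ≤ i → i < 10 → (PySem.List.pyGetD array i 0 ≠ 0 ↔ i ∈ seen))

theorem set_add_of_mem {x : Int} {s : List Int} (h : x ∈ s) : PySem.Set.add s x = s := by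
  simp [PySem.Set.add, PySem.Set.contains, h]

theorem set_add_of_not_mem {x : Int} {s : List Int} (h : x ∉ s) :
    PySem.Set.add s x = s ++ [x] := by
  simp [PySem.Set.add, PySem.Set.contains, h]

theorem seen_length_le (seen : List Int) (hn : seen.Nodup)
    (hb : ∀ x ∈ seen, 0 ≤ x ∧ x < 10) : seen.length ≤ 10 := by
  have hsub : seen.toFinset ⊆ Finset.Ico (0 : Int) 10 := by
    intro x hx
    simp only [List.mem_toFinset] at hx
    have := hb x hx
    simp [Finset.mem_Ico]; omega
  have := Finset.card_le_card hsub
  rw [List.toFinset_card_of_nodup hn] at this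
  simpa using this

theorem seen_saturated (seen : List Int) (hn : seen.Nodup)
    (hb : ∀ x ∈ seen, 0 ≤ x ∧ x < 10) (hl : seen.length = 10) :
    ∀ d : Int, 0 ≤ d → d < 10 → d ∈ seen := by
  have hsub : seen.toFinset ⊆ Finset.Ico (0 : Int) 10 := by
    intro x hx
    simp only [List.mem_toFinset] at hx
    have := hb x hx
    simp [Finset.mem_Ico]; omega
  have hcard : (Finset.Ico (0 : Int) 10).card ≤ seen.toFinset.card := by
    rw [List.toFinset_card_of_nodup hn, hl]; simp
  have heq := Finset.eq_of_subset_of_card_le hsub hcard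
  intro d h0 h1
  have : d ∈ seen.toFinset := by rw [heq]; simp [Finset.mem_Ico]; omega
  simpa using this

theorem seen_length_eq (seen : List Int) (hn : seen.Nodup)
    (hb : ∀ x ∈ seen, 0 ≤ x ∧ x < 10) (hall : ∀ d : Int, 0 ≤ d → d < 10 → d ∈ seen) :
    seen.length = 10 := by
  have hsub : seen.toFinset ⊆ Finset.Ico (0 : Int) 10 := by
    intro x hx
    simp only [List.mem_toFinset] at hx
    have := hb x hx
    simp [Finset.mem_Ico]; omega
  have hsub2 : Finset.Ico (0 : Int) 10 ⊆ seen.toFinset := by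
    intro x hx
    simp only [Finset.mem_Ico] at hx
    simpa using hall x hx.1 hx.2
  have : seen.toFinset = Finset.Ico (0 : Int) 10 := Finset.Subset.antisymm hsub hsub2
  have hc := congrArg Finset.card this
  rw [List.toFinset_card_of_nodup hn] at hc
  simpa using hc

-- once the set is full, digit collection changes nothing
theorem collectDigits_saturated (fuel : Nat) (seen : List Int) (t : Int) (hn : seen.Nodup)
    (hb : ∀ x ∈ seen, 0 ≤ x ∧ x < 10) (hl : seen.length = 10) :
    collectDigits fuel seen t = seen := by
  induction fuel generalizing t with
  | zero => rfl
  | succ fuel ih =>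
    unfold collectDigits
    by_cases ht : 0 < t
    · have hmem : PySem.Int.mod t 10 ∈ seen :=
        seen_saturated seen hn hb hl _ (PySem.Int.mod_nonneg t (by norm_num))
          (PySem.Int.mod_lt t (by norm_num))
      have hadd : PySem.Set.add seen (PySem.Int.mod t 10) = seen := set_add_of_mem hmem
      simp only [ht, if_true, hadd]
      exact ih _
    · simp [ht]

-- the core inner-loop correspondence: same fuel, same t
theorem digit_corr (fuel : Nat) (t count : Int) (array : List Int) (seen : List Int)
    (nownum : Int) (hinv : DigitInv count array seen) (hpos : 0 < count) :
    ((collectDigits fuel seen t).length = 10 ∧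
       (digitLoopA fuel count array nownum t).1 = some (PySem.Int.toStr nownum)) ∨
    ((collectDigits fuel seen t).length ≠ 10 ∧ ∃ array',
       digitLoopA fuel count array nownum t =
         (none, 10 - ((collectDigits fuel seen t).length : Int), array') ∧
       DigitInv (10 - ((collectDigits fuel seen t).length : Int)) array' (collectDigits fuel seen t)) := by
  induction fuel generalizing t count array seen with
  | zero =>
    right
    obtain ⟨hlen, hn, hb, hc, hm⟩ := hinv
    refine ⟨?_, array, ?_, ?_⟩
    · simp only [collectDigits]; omega
    · simp only [digitLoopA, collectDigits]; rw [hc]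
    · simp only [collectDigits]
      unfold DigitInv
      exact ⟨hlen, hn, hb, rfl, hm⟩
  | succ fuel ih =>
    obtain ⟨hlen, hn, hb, hc, hm⟩ := hinv
    by_cases ht : 0 < t
    · have hr0 : 0 ≤ PySem.Int.mod t 10 := PySem.Int.mod_nonneg t (by norm_num)
      have hr1 : PySem.Int.mod t 10 < 10 := PySem.Int.mod_lt t (by norm_num)
      set rem := PySem.Int.mod t 10 with hrem
      by_cases hmem : rem ∈ seen
      · -- digit already seen: A's array entry is nonzero, the set add is a no-op
        have hhit : PySem.List.pyGetD array rem 0 ≠ 0 := (hm rem hr0 hr1).mpr hmem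
        have hadd : PySem.Set.add seen rem = seen := set_add_of_mem hmem
        have hA : digitLoopA (fuel + 1) count array nownum t =
            digitLoopA fuel count array nownum (PySem.Int.floordiv t 10) := by
          simp only [digitLoopA, ht, if_true, ← hrem, hhit, if_false, if_neg (by omega : ¬ count = 0)]
        have hB : collectDigits (fuel + 1) seen t =
            collectDigits fuel seen (PySem.Int.floordiv t 10) := by
          simp only [collectDigits, ht, if_true, ← hrem, hadd]
        rw [hA, hB]
        exact ih _ count array seen ⟨hlen, hn, hb, hc, hm⟩ hpos
      · -- new digit
        have hhit : PySem.List.pyGetD array rem 0 = 0 := by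
          by_contra h; exact hmem ((hm rem hr0 hr1).mp h)
        have hadd : PySem.Set.add seen rem = seen ++ [rem] := set_add_of_not_mem hmem
        set array' := PySem.List.pySetD array rem (PySem.List.pyGetD array rem 0 + 1) with harr
        have hinv' : DigitInv (count - 1) array' (seen ++ [rem]) := by
          refine ⟨?_, ?_, ?_, ?_, ?_⟩
          · rw [harr, PySem.List.length_pySetD, hlen]
          · refine List.Nodup.append hn (List.nodup_singleton _) ?_
            intro a ha hb
            simp only [List.mem_singleton] at hb
            exact hmem (hb ▸ ha)
          · intro x hx
            rcases List.mem_append.mp hx with h | h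
            · exact hb x h
            · simp at h; subst h; exact ⟨hr0, hr1⟩
          · simp [hc]; omega
          · intro i h0 h1
            have hi : ((i.toNat : Int)) = i := by omega
            have hr : ((rem.toNat : Int)) = rem := by omega
            have hset : PySem.List.pyGetD array' i 0 =
                if i.toNat = rem.toNat then PySem.List.pyGetD array rem 0 + 1
                else PySem.List.pyGetD array i 0 := by
              rw [harr, ← hr, ← hi,
                PySem.List.pyGetD_pySetD_natCast array rem.toNat i.toNat _ _ (by rw [hlen]; omega)]
              have hmax : max i 0 = i := by omega
              simp [hr, hmax]
            rw [hset]
            by_cases hir : i.toNat = rem.toNat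
            · have hieq : i = rem := by omega
              subst hieq
              simp [hhit]
            · have hne : i ≠ rem := by omega
              simp only [hir, if_false, List.mem_append, List.mem_singleton]
              rw [hm i h0 h1]
              simp [hne]
        by_cases hdone : count - 1 = 0
        · -- A returns here; the reference set is full and stays full
          left
          have hlfull : (seen ++ [rem]).length = 10 := by
            simp; omega
          have hn' : (seen ++ [rem]).Nodup := hinv'.2.1
          have hb' := hinv'.2.2.1
          have hsat := collectDigits_saturated fuel (seen ++ [rem]) (PySem.Int.floordiv t 10) hn' hb' hlfull
          constructor
          · simp only [collectDigits, ht, if_true, ← hrem, hadd, hsat, hlfull]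
          · simp only [digitLoopA, ht, if_true, ← hrem, hhit, if_true, hdone]
        · have hA : digitLoopA (fuel + 1) count array nownum t =
              digitLoopA fuel (count - 1) array' nownum (PySem.Int.floordiv t 10) := by
            simp only [digitLoopA, ht, if_true, ← hrem, hhit, if_true, if_neg hdone, harr]
          have hB : collectDigits (fuel + 1) seen t =
              collectDigits fuel (seen ++ [rem]) (PySem.Int.floordiv t 10) := by
            simp only [collectDigits, ht, if_true, ← hrem, hadd]
          rw [hA, hB]
          have hle := seen_length_le (seen ++ [rem]) hinv'.2.1 hinv'.2.2.1
          have hpos' : 0 < count - 1 := by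
            have : count - 1 = 10 - ((seen ++ [rem]).length : Int) := hinv'.2.2.2.1
            simp at hle ⊢
            omega
          exact ih _ (count - 1) array' (seen ++ [rem]) hinv' hpos'
    · -- t ≤ 0: both loops do nothing
      right
      refine ⟨?_, array, ?_, ?_⟩
      · simp only [collectDigits, ht, if_false]; omega
      · simp only [digitLoopA, collectDigits, ht, if_false]; rw [hc]
      · simp only [collectDigits, ht, if_false]
        unfold DigitInv
        exact ⟨hlen, hn, hb, rfl, hm⟩

-- outer loop correspondence for num > 0: A's loop equals the reference loop
theorem loop_corr (fuel : Nat) (num : Int) (hnum : 0 < num) :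
    ∀ (count : Int) (array : List Int) (seen : List Int) (counted : PySem.Dict Int Int)
      (nownum : Int), DigitInv count array seen → (seen.length : Int) < 10 →
      (∀ k ∈ counted.keys, k ≤ nownum) →
      loopA fuel num count array counted nownum = loopR fuel num seen nownum := by
  induction fuel with
  | zero => intros; rfl
  | succ fuel ih =>
    intro count array seen counted nownum hinv hlt hkeys
    have hfresh : counted.contains (nownum + num) = false := by
      by_contra h
      have : counted.contains (nownum + num) = true := by
        cases hcc : counted.contains (nownum + num) <;> simp_all
      have := hkeys _ ((PySem.Dict.contains_iff_mem_keys _ _).mp this)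
      omega
    have hpos : 0 < count := by rw [hinv.2.2.2.1]; omega
    have hcorr := digit_corr ((nownum + num).toNat + 1) (nownum + num) count array seen
      (nownum + num) hinv hpos
    unfold loopA loopR
    simp only [hfresh, Bool.false_eq_true, if_false]
    rcases hcorr with ⟨hfull, hsome⟩ | ⟨hne, array', heq, hinv'⟩
    · -- the answer is found at this multiple
      rcases hA : digitLoopA ((nownum + num).toNat + 1) count array (nownum + num) (nownum + num)
        with ⟨o, c', a'⟩
      rw [hA] at hsome
      simp at hsome
      subst hsome
      simp [PySem.Set.len, hfull]
    · rw [heq]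
      have hlen10 : (collectDigits ((nownum + num).toNat + 1) seen (nownum + num)).length ≤ 10 :=
        seen_length_le _ hinv'.2.1 hinv'.2.2.1
      have hset : ¬ PySem.Set.len (collectDigits ((nownum + num).toNat + 1) seen (nownum + num)) = 10 := by
        simp [PySem.Set.len]; omega
      simp only [hset, if_false]
      refine ih _ array' _ _ _ hinv' (by omega) ?_
      intro k hk
      rcases (PySem.Dict.mem_keys_insert _ _ _ _).mp hk with h | h
      · omega
      · have := hkeys k h; omega

-- ===== characterisation of the reference loop in per-digit terms =====

-- all ten digits occur among the first k positive multiples of num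
def FullAt (num : Int) (k : Nat) : Prop :=
  ∀ d : Int, 0 ≤ d → d < 10 →
    ∃ j : Nat, 1 ≤ j ∧ j ≤ k ∧ hasDig ((j : Int) * num) d = true

def SeenInv (num : Int) (k0 : Nat) (seen : List Int) : Prop :=
  seen.Nodup ∧
  ∀ x : Int, x ∈ seen ↔ ∃ j : Nat, 1 ≤ j ∧ j ≤ k0 ∧ hasDig ((j : Int) * num) x = true

theorem mem_collectDigits (fuel : Nat) :
    ∀ (t : Int) (seen : List Int) (x : Int), t.toNat < fuel →
      (x ∈ collectDigits fuel seen t ↔ x ∈ seen ∨ hasDig t x = true) := by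
  induction fuel with
  | zero => intro t seen x h; omega
  | succ fuel ih =>
    intro t seen x h
    by_cases hp : 0 < t
    · have h10 : PySem.Int.floordiv t 10 = t / 10 :=
        PySem.Int.floordiv_eq_ediv_of_pos (by norm_num)
      have hstep : collectDigits (fuel + 1) seen t =
          collectDigits fuel (PySem.Set.add seen (PySem.Int.mod t 10)) (PySem.Int.floordiv t 10) := by
        simp only [collectDigits, hp, if_true]
      rw [hstep, ih _ _ x (by omega)]
      have hmemadd : x ∈ PySem.Set.add seen (PySem.Int.mod t 10) ↔
          x ∈ seen ∨ x = PySem.Int.mod t 10 := by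
        by_cases hm : PySem.Int.mod t 10 ∈ seen
        · rw [set_add_of_mem hm]
          constructor
          · exact Or.inl
          · rintro (h | h)
            · exact h
            · rw [h]; exact hm
        · rw [set_add_of_not_mem hm]
          rw [List.mem_append, List.mem_singleton]
      have hunf : hasDig t x =
          ((PySem.Int.mod t 10 = x : Bool) || hasDig (PySem.Int.floordiv t 10) x) := by
        rw [hasDig]
        simp [hp]
      rw [hmemadd, hunf]
      simp only [Bool.or_eq_true, decide_eq_true_eq]
      constructor
      · rintro ((h | h) | h)
        · exact Or.inl h
        · exact Or.inr (Or.inl h.symm)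
        · exact Or.inr (Or.inr h)
      · rintro (h | h | h)
        · exact Or.inl (Or.inl h)
        · exact Or.inl (Or.inr h.symm)
        · exact Or.inr h
    · simp only [collectDigits, hp, if_false]
      rw [hasDig_nonpos hp]
      simp

theorem nodup_collectDigits (fuel : Nat) :
    ∀ (t : Int) (seen : List Int), seen.Nodup → (collectDigits fuel seen t).Nodup := by
  induction fuel with
  | zero => intro t seen h; exact h
  | succ fuel ih =>
    intro t seen h
    by_cases hp : 0 < t
    · simp only [collectDigits, hp, if_true]
      apply ih
      by_cases hm : PySem.Int.mod t 10 ∈ seen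
      · rw [set_add_of_mem hm]; exact h
      · rw [set_add_of_not_mem hm]
        refine List.Nodup.append h (List.nodup_singleton _) ?_
        intro a ha hb
        simp only [List.mem_singleton] at hb
        exact hm (hb ▸ ha)
    · simp only [collectDigits, hp, if_false]; exact h

theorem seen_step {num : Int} {k0 : Nat} {seen : List Int} (hinv : SeenInv num k0 seen) :
    SeenInv num (k0 + 1)
      (collectDigits ((((k0 : Int) + 1) * num).toNat + 1) seen (((k0 : Int) + 1) * num)) := by
  obtain ⟨hn, hmem⟩ := hinv
  constructor
  · exact nodup_collectDigits _ _ _ hn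
  · intro x
    rw [mem_collectDigits _ _ _ _ (by omega), hmem]
    have hcast : ((k0 : Int) + 1) = (((k0 + 1 : Nat) : Int)) := by push_cast; ring
    constructor
    · rintro (⟨j, h1, h2, h3⟩ | h)
      · exact ⟨j, h1, by omega, h3⟩
      · exact ⟨k0 + 1, by omega, by omega, by rw [← hcast]; exact h⟩
    · rintro ⟨j, h1, h2, h3⟩
      by_cases hj : j ≤ k0
      · exact Or.inl ⟨j, h1, hj, h3⟩
      · have : j = k0 + 1 := by omega
        subst this
        right
        rw [hcast]
        exact h3

theorem seen_bounds {num : Int} {k0 : Nat} {seen : List Int} (hinv : SeenInv num k0 seen) :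
    ∀ x ∈ seen, 0 ≤ x ∧ x < 10 := by
  intro x hx
  obtain ⟨j, _, _, h⟩ := (hinv.2 x).mp hx
  exact hasDig_bounds h

theorem full_iff_len {num : Int} {k0 : Nat} {seen : List Int} (hinv : SeenInv num k0 seen) :
    seen.length = 10 ↔ FullAt num k0 := by
  constructor
  · intro hl d h0 h1
    exact (hinv.2 d).mp (seen_saturated seen hinv.1 (seen_bounds hinv) hl d h0 h1)
  · intro hf
    refine seen_length_eq seen hinv.1 (seen_bounds hinv) ?_
    intro d h0 h1
    exact (hinv.2 d).mpr (hf d h0 h1)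

-- loopR finds the first full prefix
theorem loopR_found (num : Int) (fuel : Nat) :
    ∀ (k0 k : Nat) (seen : List Int), SeenInv num k0 seen →
      k0 < k → k ≤ k0 + fuel → FullAt num k →
      (∀ j : Nat, k0 < j → j < k → ¬ FullAt num j) →
      loopR fuel num seen ((k0 : Int) * num) = PySem.Int.toStr ((k : Int) * num) := by
  induction fuel with
  | zero => intro k0 k seen _ h1 h2 _ _; omega
  | succ fuel ih =>
    intro k0 k seen hinv h1 h2 hfull hmin
    have hn' : (k0 : Int) * num + num = ((k0 : Int) + 1) * num := by ring
    have hcast : ((k0 : Int) + 1) = (((k0 + 1 : Nat) : Int)) := by push_cast; ring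
    have hinv' := seen_step (num := num) (k0 := k0) (seen := seen) hinv
    rw [hcast] at hinv'
    unfold loopR
    rw [hn', hcast]
    by_cases hk : k = k0 + 1
    · subst hk
      have hlen := (full_iff_len hinv').mpr hfull
      have hlenI : PySem.Set.len (collectDigits (((((k0 + 1 : Nat) : Int)) * num).toNat + 1) seen
          ((((k0 + 1 : Nat) : Int)) * num)) = 10 := by
        simp only [PySem.Set.len]
        rw [hlen]
        norm_num
      rw [if_pos hlenI]
    · have hnf : ¬ FullAt num (k0 + 1) := hmin (k0 + 1) (by omega) (by omega)
      have hlenI : ¬ PySem.Set.len (collectDigits (((((k0 + 1 : Nat) : Int)) * num).toNat + 1) seen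
          ((((k0 + 1 : Nat) : Int)) * num)) = 10 := by
        simp only [PySem.Set.len]
        intro h
        exact hnf ((full_iff_len hinv').mp (by exact_mod_cast h))
      rw [if_neg hlenI]
      exact ih (k0 + 1) k _ hinv' (by omega) (by omega) hfull
        (fun j hj1 hj2 => hmin j (by omega) hj2)

theorem loopR_none (num : Int) (fuel : Nat) :
    ∀ (k0 : Nat) (seen : List Int), SeenInv num k0 seen →
      (∀ j : Nat, k0 < j → j ≤ k0 + fuel → ¬ FullAt num j) →
      loopR fuel num seen ((k0 : Int) * num) = "INSOMNIA" := by
  induction fuel with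
  | zero => intros; rfl
  | succ fuel ih =>
    intro k0 seen hinv hnone
    have hn' : (k0 : Int) * num + num = ((k0 : Int) + 1) * num := by ring
    have hcast : ((k0 : Int) + 1) = (((k0 + 1 : Nat) : Int)) := by push_cast; ring
    have hinv' := seen_step (num := num) (k0 := k0) (seen := seen) hinv
    rw [hcast] at hinv'
    unfold loopR
    rw [hn', hcast]
    have hnf : ¬ FullAt num (k0 + 1) := hnone (k0 + 1) (by omega) (by omega)
    have hlenI : ¬ PySem.Set.len (collectDigits (((((k0 + 1 : Nat) : Int)) * num).toNat + 1) seen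
        ((((k0 + 1 : Nat) : Int)) * num)) = 10 := by
      simp only [PySem.Set.len]
      intro h
      exact hnf ((full_iff_len hinv').mp (by exact_mod_cast h))
    rw [if_neg hlenI]
    exact ih (k0 + 1) _ hinv' (fun j hj1 hj2 => hnone j (by omega) (by omega))

-- ===== characterisation of B's per-digit search =====

theorem firstK_some_char (num d : Int) (fuel : Nat) :
    ∀ (k0 : Nat) (k : Int), firstK fuel num d (k0 : Int) = some k →
      ∃ kn : Nat, k = (kn : Int) ∧ k0 < kn ∧ kn ≤ k0 + fuel ∧
        hasDig ((kn : Int) * num) d = true ∧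
        (∀ j : Nat, k0 < j → j < kn → hasDig ((j : Int) * num) d = false) := by
  induction fuel with
  | zero => intro k0 k h; simp [firstK] at h
  | succ fuel ih =>
    intro k0 k h
    have hcast : ((k0 : Int) + 1) = (((k0 + 1 : Nat) : Int)) := by push_cast; ring
    by_cases hd : digitSearch ((((k0 : Int) + 1) * num).toNat + 1) d (((k0 : Int) + 1) * num) = true
    · simp only [firstK, hd, if_true, Option.some.injEq] at h
      refine ⟨k0 + 1, by omega, by omega, by omega, ?_, ?_⟩
      · have hds := digitSearch_eq_hasDig ((((k0 : Int) + 1) * num).toNat + 1) d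
          (((k0 : Int) + 1) * num) (by omega)
        rw [← hcast, ← hds]
        exact hd
      · intro j hj1 hj2; omega
    · simp only [firstK, hd] at h
      rw [hcast] at h
      obtain ⟨kn, hk, h1, h2, h3, h4⟩ := ih (k0 + 1) k h
      refine ⟨kn, hk, by omega, by omega, h3, ?_⟩
      intro j hj1 hj2
      by_cases hj : j = k0 + 1
      · subst hj
        have hds := digitSearch_eq_hasDig ((((k0 : Int) + 1) * num).toNat + 1) d
          (((k0 : Int) + 1) * num) (by omega)
        rw [← hcast, ← hds]
        simpa using hd
      · exact h4 j (by omega) hj2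

theorem firstK_none_char (num d : Int) (fuel : Nat) :
    ∀ (k0 : Nat), firstK fuel num d (k0 : Int) = none →
      ∀ j : Nat, k0 < j → j ≤ k0 + fuel → hasDig ((j : Int) * num) d = false := by
  induction fuel with
  | zero => intro k0 _ j h1 h2; omega
  | succ fuel ih =>
    intro k0 h j h1 h2
    have hcast : ((k0 : Int) + 1) = (((k0 + 1 : Nat) : Int)) := by push_cast; ring
    by_cases hd : digitSearch ((((k0 : Int) + 1) * num).toNat + 1) d (((k0 : Int) + 1) * num) = true
    · simp [firstK, hd] at h
    · simp only [firstK, hd] at h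
      rw [hcast] at h
      by_cases hj : j = k0 + 1
      · subst hj
        have hds := digitSearch_eq_hasDig ((((k0 : Int) + 1) * num).toNat + 1) d
          (((k0 : Int) + 1) * num) (by omega)
        rw [← hcast, ← hds]
        simpa using hd
      · exact ih (k0 + 1) h j (by omega) (by omega)

-- ===== the fold computing max over the ten searches =====

theorem foldStep_none (num : Int) (ds : List Int) : ds.foldl (foldStep num) none = none := by
  induction ds with
  | nil => rfl
  | cons d ds ih => simpa [foldStep] using ih

theorem fold_none_iff (num : Int) (ds : List Int) :
    ∀ m : Int, (ds.foldl (foldStep num) (some m) = none ↔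
      ∃ d ∈ ds, firstK 100000 num d 0 = none) := by
  induction ds with
  | nil => intro m; simp
  | cons d ds ih =>
    intro m
    rcases hd : firstK 100000 num d 0 with _ | k
    · simp only [List.foldl_cons]
      rw [show foldStep num (some m) d = none by simp [foldStep, hd]]
      rw [foldStep_none]
      simp [hd]
    · simp only [List.foldl_cons]
      rw [show foldStep num (some m) d = some (max m k) by simp [foldStep, hd]]
      rw [ih]
      simp only [List.mem_cons]
      constructor
      · rintro ⟨d', h1, h2⟩; exact ⟨d', Or.inr h1, h2⟩
      · rintro ⟨d', h1 | h1, h2⟩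
        · subst h1; rw [hd] at h2; exact absurd h2 (by simp)
        · exact ⟨d', h1, h2⟩

theorem fold_some_char (num : Int) (ds : List Int) :
    ∀ (m K : Int), ds.foldl (foldStep num) (some m) = some K →
      m ≤ K ∧ (∀ d ∈ ds, ∃ k, firstK 100000 num d 0 = some k ∧ k ≤ K) ∧
        (K = m ∨ ∃ d ∈ ds, firstK 100000 num d 0 = some K) := by
  induction ds with
  | nil =>
    intro m K h
    simp only [List.foldl_nil, Option.some.injEq] at h
    exact ⟨le_of_eq h, by simp, Or.inl h.symm⟩
  | cons d ds ih =>
    intro m K h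
    rcases hd : firstK 100000 num d 0 with _ | k
    · rw [List.foldl_cons, show foldStep num (some m) d = none by simp [foldStep, hd],
        foldStep_none] at h
      exact absurd h (by simp)
    · rw [List.foldl_cons, show foldStep num (some m) d = some (max m k) by simp [foldStep, hd]] at h
      obtain ⟨h1, h2, h3⟩ := ih (max m k) K h
      refine ⟨by omega, ?_, ?_⟩
      · intro d' hd'
        rcases List.mem_cons.mp hd' with h | h
        · subst h
          exact ⟨k, hd, by omega⟩
        · exact h2 d' h
      · rcases h3 with h | ⟨d', hmem, hfk⟩
        · by_cases hKm : K = m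
          · exact Or.inl hKm
          · have hKk : K = k := by
              rcases le_total m k with hmk | hmk
              · rw [max_eq_right hmk] at h; exact h
              · rw [max_eq_left hmk] at h; exact absurd h hKm
            refine Or.inr ⟨d, List.mem_cons_self .., ?_⟩
            rw [hKk]
            exact hd
        · exact Or.inr ⟨d', List.mem_cons_of_mem _ hmem, hfk⟩

-- FullAt in terms of the ten digits of pyRange 0 10 1
theorem pyRange_ten : PySem.List.pyRange 0 10 1 = [0, 1, 2, 3, 4, 5, 6, 7, 8, 9] := by decide

-- minimal full prefix exists when some full prefix does
theorem exists_min_full (num : Int) (k : Nat) (hk : FullAt num k) :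
    ∃ km : Nat, FullAt num km ∧ km ≤ k ∧ ∀ j : Nat, j < km → ¬ FullAt num j := by
  classical
  have h : ∃ n, FullAt num n := ⟨k, hk⟩
  exact ⟨Nat.find h, Nat.find_spec h, Nat.find_min' h hk, fun j hj => Nat.find_min h hj⟩

-- ===== VERDICT (by name: the statement is the Claim_ definition above) =====
-- per-digit facts inside a full prefix: the search succeeds and lands at or below km
theorem perdigit (num : Int) (km : Nat) (hkm : FullAt num km) (hle : km ≤ 100000)
    (d : Int) (hd0 : 0 ≤ d) (hd1 : d < 10) :
    ∃ kn : Nat, firstK 100000 num d 0 = some ((kn : Int)) ∧ 1 ≤ kn ∧ kn ≤ km ∧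
      hasDig ((kn : Int) * num) d = true := by
  obtain ⟨j, hj1, hj2, hjP⟩ := hkm d hd0 hd1
  rcases hfk : firstK 100000 num d 0 with _ | kk
  · have h0 : firstK 100000 num d ((0 : Nat) : Int) = none := by simpa using hfk
    have := firstK_none_char num d 100000 0 h0 j (by omega) (by omega)
    rw [this] at hjP
    exact absurd hjP (by simp)
  · have h0 : firstK 100000 num d ((0 : Nat) : Int) = some kk := by simpa using hfk
    obtain ⟨kn, hkeq, hlt0, hle', hP, hmin⟩ := firstK_some_char num d 100000 0 kk h0
    refine ⟨kn, by rw [hkeq], by omega, ?_, hP⟩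
    by_contra hgt
    have hjlt : j < kn := by omega
    have := hmin j (by omega) hjlt
    rw [this] at hjP
    exact absurd hjP (by simp)

theorem getresult_spec : Claim_equal_getresult := by
  intro num _ hpre
  unfold Spec_getresult
  rcases lt_or_eq_of_le hpre with hpos | hzero
  · unfold getresult getresult_alt
    rw [if_neg (by omega : ¬ num = 0)]
    have hinv0 : SeenInv num 0 [] := by
      constructor
      · exact List.nodup_nil
      · intro x
        simp only [List.not_mem_nil, false_iff, not_exists]
        intro j
        omega
    have hA : loopA 100000 num 10 (List.replicate 10 0) PySem.Dict.empty 0 =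
        loopR 100000 num [] 0 := by
      refine loop_corr 100000 num hpos 10 (List.replicate 10 0) [] PySem.Dict.empty 0 ?_ (by simp) (by simp)
      refine ⟨by simp, by simp, by simp, by simp, ?_⟩
      intro i h0 h1
      have hz : PySem.List.pyGetD (List.replicate 10 (0 : Int)) i 0 = 0 := by
        rw [PySem.List.pyGetD_eq_getElem _ 0 h0 (by simpa using h1)]
        rw [List.getElem_replicate]
      rw [hz]
      simp
    have hzero' : ((0 : Nat) : Int) * num = 0 := by simp
    rw [hA, pyRange_ten]
    by_cases hfull : ∃ k : Nat, 0 < k ∧ k ≤ 100000 ∧ FullAt num k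
    · obtain ⟨k, hk0, hk1, hkf⟩ := hfull
      obtain ⟨km, hkmf, hkmle, hkmmin⟩ := exists_min_full num k hkf
      have hkm0 : 0 < km := by
        by_contra h
        obtain ⟨j, hj1, hj2, _⟩ := hkmf 0 (by norm_num) (by norm_num)
        omega
      have hAval := loopR_found num 100000 0 km [] hinv0 (by omega) (by omega) hkmf
        (fun j hj1 hj2 => hkmmin j hj2)
      rw [hzero'] at hAval
      rw [hAval]
      -- B side: the fold returns exactly km
      have hper := perdigit num km hkmf (by omega)
      rcases hF : [0,1,2,3,4,5,6,7,8,9].foldl (foldStep num) (some 0) with _ | K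
      · exfalso
        obtain ⟨d, hdmem, hdnone⟩ := (fold_none_iff num _ 0).mp hF
        have hd01 : 0 ≤ d ∧ d < 10 := by fin_cases hdmem <;> norm_num
        obtain ⟨kn, hsome, _, _, _⟩ := hper d hd01.1 hd01.2
        rw [hsome] at hdnone
        exact absurd hdnone (by simp)
      · obtain ⟨hK0, hall, hlast⟩ := fold_some_char num _ 0 K hF
        -- every per-digit index is ≤ K and K itself is one of them (or 0)
        have hKle : K ≤ (km : Int) := by
          rcases hlast with h | ⟨d, hdmem, hdK⟩
          · omega
          · have hd01 : 0 ≤ d ∧ d < 10 := by fin_cases hdmem <;> norm_num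
            obtain ⟨kn, hsome, _, hknle, _⟩ := hper d hd01.1 hd01.2
            rw [hsome] at hdK
            have : K = (kn : Int) := by
              exact (Option.some.injEq _ _).mp hdK.symm
            omega
        have hKfull : FullAt num K.toNat := by
          intro d hd0 hd1
          have hdmem : d ∈ ([0,1,2,3,4,5,6,7,8,9] : List Int) := by
            interval_cases d <;> norm_num
          obtain ⟨k', hk'some, hk'le⟩ := hall d hdmem
          obtain ⟨kn, hsome, hkn1, _, hknP⟩ := hper d hd0 hd1
          rw [hsome] at hk'some
          have hkk : k' = (kn : Int) := by
            exact (Option.some.injEq _ _).mp hk'some.symm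
          refine ⟨kn, hkn1, ?_, hknP⟩
          omega
        have hkmK : km ≤ K.toNat := by
          by_contra h
          exact hkmmin K.toNat (by omega) hKfull
        have hKkm : K = (km : Int) := by omega
        rw [hKkm, mul_comm]
    · have hAval := loopR_none num 100000 0 [] hinv0
        (fun j hj1 hj2 hf => hfull ⟨j, by omega, by omega, hf⟩)
      rw [hzero'] at hAval
      rw [hAval]
      rcases hF : [0,1,2,3,4,5,6,7,8,9].foldl (foldStep num) (some 0) with _ | K
      · rfl
      · exfalso
        obtain ⟨hK0, hall, hlast⟩ := fold_some_char num _ 0 K hF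
        have hex : ∃ kn : Nat, 0 < kn ∧ kn ≤ 100000 ∧ K = (kn : Int) := by
          rcases hlast with h | ⟨d, hdmem, hdK⟩
          · exfalso
            obtain ⟨k', hk'some, hk'le⟩ := hall 0 (by norm_num)
            have h0 : firstK 100000 num 0 ((0 : Nat) : Int) = some k' := by simpa using hk'some
            obtain ⟨kn, hkeq, hlt0, _, _, _⟩ := firstK_some_char num 0 100000 0 k' h0
            omega
          · have h0 : firstK 100000 num d ((0 : Nat) : Int) = some K := by simpa using hdK
            obtain ⟨kn, hkeq, hlt0, hle', _, _⟩ := firstK_some_char num d 100000 0 K h0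
            exact ⟨kn, by omega, by omega, hkeq⟩
        obtain ⟨kn, hkn0, hknle, hKeq⟩ := hex
        have hKfull : FullAt num kn := by
          intro d hd0 hd1
          have hdmem : d ∈ ([0,1,2,3,4,5,6,7,8,9] : List Int) := by
            interval_cases d <;> norm_num
          obtain ⟨k', hk'some, hk'le⟩ := hall d hdmem
          have h0 : firstK 100000 num d ((0 : Nat) : Int) = some k' := by simpa using hk'some
          obtain ⟨kd, hkdeq, hkd0, _, hkdP, _⟩ := firstK_some_char num d 100000 0 k' h0
          refine ⟨kd, by omega, by omega, hkdP⟩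
        exact hfull ⟨kn, hkn0, hknle, hKfull⟩
  · subst hzero
    decide
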